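-- pv_equiv track=rewrite | github.com/SoerenWilkening/quantum-programming-package | src/quantum_language/call_graph.py | _compute_t_count
-- ===== SOURCE A (Python) =====
-- def _compute_t_count(gates: list) -> int:
--     """Compute T-gate count using dual formula.
--
--     Counts direct T_GATE (type 10) and TDG_GATE (type 11) occurrences.
--     If none found, falls back to 7 * CCX count (gates with num_controls >= 2).
--     """
--     if not gates:
--         return 0
--     t_direct = 0
--     ccx_count = 0
--     for g in gates:
--         gtype = g.get("type", -1)
--         if gtype == 10 or gtype == 11:
--             t_direct += 1
--         if g.get("num_controls", 0) >= 2: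
--             ccx_count += 1
--     return t_direct if t_direct > 0 else 7 * ccx_count
-- ===== SOURCE B (Python) =====
-- def _compute_t_count(gates: list) -> int:
--     # State-machine scan with early return: count CCX-like gates only until the
--     # first T/Tdg gate is met; from that point on, only T/Tdg gates in the
--     # remaining suffix matter and the CCX tally is abandoned.
--     ccx = 0
--     for i, g in enumerate(gates):
--         t = g.get("type", -1)
--         if t == 10 or t == 11:
--             td = 1
--             for h in gates[i + 1:]:
--                 ht = h.get("type", -1)
--                 if ht == 10 or ht == 11:
--                     td += 1
--             return td
--         if g.get("num_controls", 0) >= 2: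
--             ccx += 1
--     return 7 * ccx
-- ===== Notes on version B (the rewrite author's own statement) =====
-- stated objective: alternative
-- what changed: Replaces A's single loop that always maintains both tallies by an early-return state machine: scan counting CCX-like gates only until the first T/Tdg gate, then switch to counting only T/Tdg gates in the remaining suffix and return immediately; the CCX tally is never completed when a T gate exists.
import Mathlib
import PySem

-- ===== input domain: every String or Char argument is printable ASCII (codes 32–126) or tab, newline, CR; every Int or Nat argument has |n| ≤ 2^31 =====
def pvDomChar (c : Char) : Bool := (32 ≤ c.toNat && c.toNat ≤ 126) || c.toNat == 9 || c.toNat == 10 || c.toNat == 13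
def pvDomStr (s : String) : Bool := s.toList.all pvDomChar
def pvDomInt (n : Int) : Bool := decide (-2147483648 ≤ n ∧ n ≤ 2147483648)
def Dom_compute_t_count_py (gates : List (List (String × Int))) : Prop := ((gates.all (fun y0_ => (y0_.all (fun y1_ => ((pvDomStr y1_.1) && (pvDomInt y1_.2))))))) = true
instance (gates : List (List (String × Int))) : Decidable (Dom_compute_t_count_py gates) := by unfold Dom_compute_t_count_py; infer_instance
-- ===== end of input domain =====

-- B replaces A's single loop that always keeps both tallies by an early-return state
-- machine: count CCX-like gates only until the first T/Tdg gate, then count only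
-- T/Tdg gates in the remaining suffix (objective: alternative).

-- ===== PORT A =====
-- g.get(k, dflt) on the dict g (built from the pair list, later duplicates overwrite)
def pvGetD (g : List (String × Int)) (k : String) (dflt : Int) : Int :=
  PySem.Dict.getD (PySem.Dict.ofList g) k dflt

def compute_t_count_py (gates : List (List (String × Int))) : Int :=
  if gates = [] then 0
  else
    let acc := gates.foldl
      (fun (acc : Int × Int) g =>
        let gtype := pvGetD g "type" (-1)
        let t := if gtype = 10 ∨ gtype = 11 then acc.1 + 1 else acc.1
        let c := if pvGetD g "num_controls" 0 ≥ 2 then acc.2 + 1 else acc.2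
        (t, c)) (0, 0)
    if acc.1 > 0 then acc.1 else 7 * acc.2

-- ===== PORT B =====
-- the inner 'for h in gates[i+1:]' loop of B: counts T/Tdg gates in the suffix
def pvCountTSuffix (rest : List (List (String × Int))) (td : Int) : Int :=
  match rest with
  | [] => td
  | h :: hs =>
    let ht := pvGetD h "type" (-1)
    pvCountTSuffix hs (if ht = 10 ∨ ht = 11 then td + 1 else td)

-- the outer loop of B: scan counting CCX-like gates until the first T/Tdg gate
def pvScan (rest : List (List (String × Int))) (ccx : Int) : Int :=
  match rest with
  | [] => 7 * ccx
  | g :: gs =>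
    let t := pvGetD g "type" (-1)
    if t = 10 ∨ t = 11 then pvCountTSuffix gs 1
    else pvScan gs (if pvGetD g "num_controls" 0 ≥ 2 then ccx + 1 else ccx)

def compute_t_count_py_alt (gates : List (List (String × Int))) : Int :=
  pvScan gates 0

-- ===== PRECONDITION & SPEC =====
def Spec_compute_t_count_py (gates : List (List (String × Int))) (out : Int) : Prop := out = compute_t_count_py_alt gates
instance (gates : List (List (String × Int))) (out : Int) : Decidable (Spec_compute_t_count_py gates out) := by unfold Spec_compute_t_count_py; infer_instance

-- ===== CLAIM (what is proved, stated in full; the proofs are below) =====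
def Claim_equal_compute_t_count_py : Prop := ∀ (gates : List (List (String × Int))), Dom_compute_t_count_py gates → Spec_compute_t_count_py gates (compute_t_count_py gates)

-- ===== LEMMAS AND PROOFS =====
def pvTc (gs : List (List (String × Int))) : Int :=
  (gs.countP (fun g => let gt := pvGetD g "type" (-1); gt == 10 || gt == 11) : Nat)

def pvCc (gs : List (List (String × Int))) : Int :=
  (gs.countP (fun g => decide (pvGetD g "num_controls" 0 ≥ 2)) : Nat)

theorem pv_fold_eq (gates : List (List (String × Int))) (a b : Int) :
    gates.foldl
      (fun (acc : Int × Int) g =>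
        let gtype := pvGetD g "type" (-1)
        let t := if gtype = 10 ∨ gtype = 11 then acc.1 + 1 else acc.1
        let c := if pvGetD g "num_controls" 0 ≥ 2 then acc.2 + 1 else acc.2
        (t, c)) (a, b)
    = (a + pvTc gates, b + pvCc gates) := by
  induction gates generalizing a b with
  | nil => simp [pvTc, pvCc]
  | cons g gs ih =>
    simp only [List.foldl_cons, ih, pvTc, pvCc, List.countP_cons]
    refine Prod.ext ?_ ?_ <;> simp only [] <;> split_ifs <;> simp_all <;> omega

theorem pv_countT_eq (gs : List (List (String × Int))) (td : Int) :
    pvCountTSuffix gs td = td + pvTc gs := by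
  induction gs generalizing td with
  | nil => simp [pvCountTSuffix, pvTc]
  | cons h hs ih =>
    simp only [pvCountTSuffix, ih, pvTc, List.countP_cons]
    split_ifs <;> simp_all
    omega

theorem pv_scan_eq (gs : List (List (String × Int))) (ccx : Int) :
    pvScan gs ccx = if pvTc gs > 0 then pvTc gs else 7 * (ccx + pvCc gs) := by
  induction gs generalizing ccx with
  | nil => simp [pvScan, pvTc, pvCc]
  | cons g rest ih =>
    by_cases h : pvGetD g "type" (-1) = 10 ∨ pvGetD g "type" (-1) = 11
    · have hT : pvTc (g :: rest) = pvTc rest + 1 := by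
        simp [pvTc, List.countP_cons]
        rcases h with h | h <;> simp [h]
      rw [show pvScan (g :: rest) ccx = pvCountTSuffix rest 1 by simp [pvScan, h],
          pv_countT_eq, hT, if_pos (by unfold pvTc; omega)]
      omega
    · have hT : pvTc (g :: rest) = pvTc rest := by
        rw [not_or] at h
        simp [pvTc, h.1, h.2]
      have hC : pvCc (g :: rest) = pvCc rest + (if pvGetD g "num_controls" 0 ≥ 2 then 1 else 0) := by
        simp only [pvCc, List.countP_cons]
        split_ifs <;> simp_all
      rw [show pvScan (g :: rest) ccx
            = pvScan rest (if pvGetD g "num_controls" 0 ≥ 2 then ccx + 1 else ccx) by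
          simp [pvScan, h], ih, hT, hC]
      split_ifs <;> omega

-- ===== VERDICT (by name: the statement is the Claim_ definition above) =====
theorem compute_t_count_py_spec : Claim_equal_compute_t_count_py := by
  intro gates _
  unfold Spec_compute_t_count_py compute_t_count_py compute_t_count_py_alt
  rw [pv_scan_eq]
  rcases gates with _ | ⟨g, gs⟩
  · simp [pvTc, pvCc]
  · rw [if_neg (by simp), pv_fold_eq]
    simp
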